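-- pv_equiv track=rewrite | github.com/hildenost/advent-of-code | 2015/16/auntsue.py | find_sue
-- ===== SOURCE A (Python) =====
-- def is_valid_part1(thing, sue, recent_sue):
--   return sue[thing] == recent_sue[thing]
--
-- def is_valid_part2(thing, sue, recent_sue):
--   if thing in ["cats", "trees"]:
--     return sue[thing] > recent_sue[thing]
--   elif thing in ["pomeranians", "goldfish"]:
--     return sue[thing] < recent_sue[thing]
--   return sue[thing] == recent_sue[thing]
--
-- def find_sue(recent_sue, sues, part=1):
--   valid = is_valid_part1 if part == 1 else is_valid_part2
--   # filtering
--   for thing in recent_sue: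
--     sues = [
--       sue for sue in sues
--       if thing not in sue
--       or valid(thing, sue, recent_sue)
--       ]
--   return sues[0]
-- ===== SOURCE B (Python) =====
-- def matches(sue, recent_sue, part):
--   part2 = part != 1
--   for thing in recent_sue:
--     if thing not in sue:
--       continue
--     have, want = sue[thing], recent_sue[thing]
--     if part2 and thing in ("cats", "trees"):
--       if not have > want:
--         return False
--     elif part2 and thing in ("pomeranians", "goldfish"):
--       if not have < want:
--         return False
--     elif have != want:
--       return False
--   return True
--
-- def find_sue(recent_sue, sues, part=1):
--   for sue in sues:
--     if matches(sue, recent_sue, part):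
--       return sue
--   raise IndexError("no matching Sue")
-- ===== Notes on version B (the rewrite author's own statement) =====
-- stated objective: alternative
-- what changed: Replaces A's property-major repeated list filtering (one rebuilt candidate list per property, then index 0) by a candidate-major first-match search: a loop over sues that returns the first candidate passing a short-circuiting per-property check with the part-2 rules inlined.
import Mathlib
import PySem

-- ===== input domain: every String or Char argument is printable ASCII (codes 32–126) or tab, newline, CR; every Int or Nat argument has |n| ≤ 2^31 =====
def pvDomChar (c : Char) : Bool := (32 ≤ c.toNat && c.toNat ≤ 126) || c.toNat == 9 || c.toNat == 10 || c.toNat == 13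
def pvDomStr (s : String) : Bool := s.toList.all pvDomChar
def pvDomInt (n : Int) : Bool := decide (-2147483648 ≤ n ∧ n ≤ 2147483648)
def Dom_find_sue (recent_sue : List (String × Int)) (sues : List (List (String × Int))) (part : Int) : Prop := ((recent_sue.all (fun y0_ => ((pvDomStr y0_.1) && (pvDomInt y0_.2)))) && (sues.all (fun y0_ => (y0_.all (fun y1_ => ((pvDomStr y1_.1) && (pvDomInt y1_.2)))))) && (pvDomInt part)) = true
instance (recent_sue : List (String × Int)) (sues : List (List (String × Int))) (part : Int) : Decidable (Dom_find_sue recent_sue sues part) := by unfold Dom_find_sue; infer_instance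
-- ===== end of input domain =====

-- B replaces A's property-major repeated filtering by a candidate-major first-match
-- search with a short-circuiting per-property check (objective: alternative).
-- Both Pythons raise IndexError when no candidate matches; Pre_ excludes exactly that.

-- ===== PORT A =====
-- dicts are association lists (lookup = first match = List.lookup); both sue[thing]
-- lookups are guarded (thing ∈ sue, thing ∈ recent_sue), so .getD 0 is never the
-- default on admitted calls and the port is exact there.
def is_valid_part1 (thing : String) (sue recent_sue : List (String × Int)) : Bool :=
  (List.lookup thing sue).getD 0 == (List.lookup thing recent_sue).getD 0

def is_valid_part2 (thing : String) (sue recent_sue : List (String × Int)) : Bool :=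
  if thing = "cats" ∨ thing = "trees" then
    decide ((List.lookup thing sue).getD 0 > (List.lookup thing recent_sue).getD 0)
  else if thing = "pomeranians" ∨ thing = "goldfish" then
    decide ((List.lookup thing sue).getD 0 < (List.lookup thing recent_sue).getD 0)
  else
    (List.lookup thing sue).getD 0 == (List.lookup thing recent_sue).getD 0

-- 'for thing in recent_sue' iterates the dict's distinct keys in insertion order
def find_sue (recent_sue : List (String × Int)) (sues : List (List (String × Int))) (part : Int) : List (String × Int) :=
  let valid := if part = 1 then is_valid_part1 else is_valid_part2
  let final :=
    (PySem.List.dedup (recent_sue.map Prod.fst)).foldl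
      (fun acc thing =>
        acc.filter (fun sue =>
          !((sue.map Prod.fst).contains thing) || valid thing sue recent_sue))
      sues
  -- 'return sues[0]': Pre_ excludes the empty case, where Python raises IndexError
  final.headD []

-- ===== PORT B =====
-- 'thing not in sue' membership test
def pvKeyIn (thing : String) (d : List (String × Int)) : Bool :=
  (d.map Prod.fst).contains thing

-- Source B's matches(): structural recursion over the dict's distinct keys, early False
def pvMatches (sue recent_sue : List (String × Int)) (part2 : Bool) : List String → Bool
  | [] => true
  | thing :: rest =>
      if !pvKeyIn thing sue then pvMatches sue recent_sue part2 rest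
      else
        let hv := (List.lookup thing sue).getD 0
        let wv := (List.lookup thing recent_sue).getD 0
        if part2 && (thing == "cats" || thing == "trees") then
          if hv > wv then pvMatches sue recent_sue part2 rest else false
        else if part2 && (thing == "pomeranians" || thing == "goldfish") then
          if hv < wv then pvMatches sue recent_sue part2 rest else false
        else if hv ≠ wv then false
        else pvMatches sue recent_sue part2 rest

-- Source B's 'for sue in sues: … return sue'; [] stands for the no-match IndexError,
-- which Pre_ excludes
def pvFirstMatch (recent_sue : List (String × Int)) (part2 : Bool) (keys : List String) :
    List (List (String × Int)) → List (String × Int)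
  | [] => []
  | sue :: rest =>
      if pvMatches sue recent_sue part2 keys then sue
      else pvFirstMatch recent_sue part2 keys rest

def find_sue_alt (recent_sue : List (String × Int)) (sues : List (List (String × Int))) (part : Int) : List (String × Int) :=
  pvFirstMatch recent_sue (!(part == 1)) (PySem.List.dedup (recent_sue.map Prod.fst)) sues

-- ===== PRECONDITION & SPEC =====
-- Pre_ excludes exactly the inputs where no candidate survives every property check:
-- there both Pythons raise IndexError (A on the final [0], B on the explicit raise).
def pvSurvives (recent_sue : List (String × Int)) (part : Int) (sue : List (String × Int)) : Bool :=
  (PySem.List.dedup (recent_sue.map Prod.fst)).all (fun thing =>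
    !((sue.map Prod.fst).contains thing) ||
      (if part = 1 then is_valid_part1 else is_valid_part2) thing sue recent_sue)

def Pre_find_sue (recent_sue : List (String × Int)) (sues : List (List (String × Int))) (part : Int) : Prop :=
  sues.any (pvSurvives recent_sue part) = true
instance (recent_sue : List (String × Int)) (sues : List (List (String × Int))) (part : Int) : Decidable (Pre_find_sue recent_sue sues part) := by unfold Pre_find_sue; infer_instance

def pvWitness_find_sue : (List (String × Int)) × (List (List (String × Int))) × Int :=
  ([("cats", 2)], [[("cats", 1)], [("cats", 2)]], 1)

def Spec_find_sue (recent_sue : List (String × Int)) (sues : List (List (String × Int))) (part : Int) (out : List (String × Int)) : Prop := out = find_sue_alt recent_sue sues part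
instance (recent_sue : List (String × Int)) (sues : List (List (String × Int))) (part : Int) (out : List (String × Int)) : Decidable (Spec_find_sue recent_sue sues part out) := by unfold Spec_find_sue; infer_instance

-- ===== CLAIM (what is proved, stated in full; the proofs are below) =====
def Claim_equal_find_sue : Prop := ∀ (recent_sue : List (String × Int)) (sues : List (List (String × Int))) (part : Int), Dom_find_sue recent_sue sues part → Pre_find_sue recent_sue sues part → Spec_find_sue recent_sue sues part (find_sue recent_sue sues part)

-- ===== LEMMAS AND PROOFS =====
-- A's repeated filtering, one pass per key, equals one filter by the conjunction.
theorem foldl_filter_eq_filter_all {α β : Type} (p : α → β → Bool) :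
    ∀ (ks : List α) (xs : List β),
      ks.foldl (fun acc k => acc.filter (p k)) xs
        = xs.filter (fun x => ks.all (fun k => p k x)) := by
  intro ks
  induction ks with
  | nil => intro xs; simp
  | cons k ks ih =>
    intro xs
    simp only [List.foldl_cons, ih, List.filter_filter, List.all_cons]
    exact List.filter_congr (fun x _ => by rw [Bool.and_comm])

-- Source B's inlined per-key test, as a boolean
def pvPerKey (thing : String) (sue recent_sue : List (String × Int)) (part2 : Bool) : Bool :=
  if part2 && (thing == "cats" || thing == "trees") then
    decide ((List.lookup thing sue).getD 0 > (List.lookup thing recent_sue).getD 0)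
  else if part2 && (thing == "pomeranians" || thing == "goldfish") then
    decide ((List.lookup thing sue).getD 0 < (List.lookup thing recent_sue).getD 0)
  else
    (List.lookup thing sue).getD 0 == (List.lookup thing recent_sue).getD 0

theorem pvMatches_cons (sue rs : List (String × Int)) (p2 : Bool) (t : String)
    (rest : List String) :
    pvMatches sue rs p2 (t :: rest)
      = ((!pvKeyIn t sue || pvPerKey t sue rs p2) && pvMatches sue rs p2 rest) := by
  simp only [pvMatches, pvPerKey]
  by_cases hmem : pvKeyIn t sue = true
  · simp only [hmem, Bool.not_true, Bool.false_eq_true, if_false, Bool.false_or]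
    by_cases h1 : (p2 && (t == "cats" || t == "trees")) = true
    · simp only [if_pos h1]
      by_cases hgt : (List.lookup t sue).getD 0 > (List.lookup t rs).getD 0 <;> simp [hgt]
    · simp only [if_neg h1]
      by_cases h2 : (p2 && (t == "pomeranians" || t == "goldfish")) = true
      · simp only [if_pos h2]
        by_cases hlt : (List.lookup t sue).getD 0 < (List.lookup t rs).getD 0 <;> simp [hlt]
      · simp only [if_neg h2]
        by_cases he : (List.lookup t sue).getD 0 = (List.lookup t rs).getD 0 <;> simp [he]
  · simp [hmem]

-- Source B's part2 branching computes A's selected validity predicate, key by key.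
theorem pvPerKey_eq_valid (t : String) (sue rs : List (String × Int)) (part : Int) :
    pvPerKey t sue rs (!(part == 1))
      = (if part = 1 then is_valid_part1 else is_valid_part2) t sue rs := by
  by_cases hp : part = 1
  · simp [pvPerKey, hp, is_valid_part1]
  · have hb : (!(part == 1)) = true := by simp [hp]
    simp only [pvPerKey, hb, Bool.true_and, if_neg hp, is_valid_part2]
    by_cases h1 : t = "cats" ∨ t = "trees"
    · have hb1 : (t == "cats" || t == "trees") = true := by
        rcases h1 with h | h <;> simp [h]
      rw [if_pos hb1, if_pos h1]
    · have hb1 : (t == "cats" || t == "trees") = false := by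
        simp only [not_or] at h1; simp [h1.1, h1.2]
      rw [hb1, if_neg h1]
      by_cases h2 : t = "pomeranians" ∨ t = "goldfish"
      · have hb2 : (t == "pomeranians" || t == "goldfish") = true := by
          rcases h2 with h | h <;> simp [h]
        simp only [Bool.false_eq_true, if_false]
        rw [if_pos hb2, if_pos h2]
      · have hb2 : (t == "pomeranians" || t == "goldfish") = false := by
          simp only [not_or] at h2; simp [h2.1, h2.2]
        simp only [Bool.false_eq_true, if_false]
        rw [hb2, if_neg h2]
        simp

-- B's short-circuiting per-candidate check computes A's per-key conjunction.
theorem pvMatches_eq_all (sue recent_sue : List (String × Int)) (part : Int) :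
    ∀ ks : List String,
      pvMatches sue recent_sue (!(part == 1)) ks
        = ks.all (fun thing =>
            !((sue.map Prod.fst).contains thing) ||
              (if part = 1 then is_valid_part1 else is_valid_part2) thing sue recent_sue) := by
  intro ks
  induction ks with
  | nil => simp [pvMatches]
  | cons thing rest ih =>
    rw [pvMatches_cons, ih, List.all_cons, pvPerKey_eq_valid, pvKeyIn]

-- B's first-match loop returns the head of the filtered list.
theorem pvFirstMatch_eq_headD (recent_sue : List (String × Int)) (part2 : Bool)
    (keys : List String) :
    ∀ sues : List (List (String × Int)),
      pvFirstMatch recent_sue part2 keys sues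
        = (sues.filter (fun sue => pvMatches sue recent_sue part2 keys)).headD [] := by
  intro sues
  induction sues with
  | nil => simp [pvFirstMatch]
  | cons sue rest ih =>
    simp only [pvFirstMatch, List.filter_cons]
    by_cases h : pvMatches sue recent_sue part2 keys = true <;> simp [h, ih]

-- ===== VERDICT (by name: the statement is the Claim_ definition above) =====
theorem find_sue_spec : Claim_equal_find_sue := by
  intro recent_sue sues part _ _
  unfold Spec_find_sue find_sue find_sue_alt
  simp only [foldl_filter_eq_filter_all, pvFirstMatch_eq_headD]
  congr 1
  exact List.filter_congr (fun sue _ => by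
    rw [pvMatches_eq_all sue recent_sue part])
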